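-- pv_equiv track=rewrite | github.com/kingjh/lyrics-game | main-2ppt-w-timing.py | get_pts
-- ===== SOURCE A (Python) =====
-- SHOW_LEN_2_PTS = {
--     0: {
--         'font': 54,
--         'line': 72,
--     },
--     22: {
--         'font': 45,
--         'line': 60,
--     },
--     30: {
--         'font': 39,
--         'line': 52,
--     },
--     38: {
--         'font': 32,
--         'line': 36,
--     },
-- }
--
-- def get_pts(show_len):
--     font_pt = line_pt = 0
--     for key in SHOW_LEN_2_PTS.keys():
--         if key > show_len:
--             break
--
--         obj = SHOW_LEN_2_PTS[key]
--         font_pt = obj['font']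
--         line_pt = obj['line']
--
--     return font_pt, line_pt
-- ===== SOURCE B (Python) =====
-- def get_pts(show_len):
--     if show_len < 0:
--         return 0, 0
--     if show_len < 22:
--         return 54, 72
--     if show_len < 30:
--         return 45, 60
--     if show_len < 38:
--         return 39, 52
--     return 32, 36
-- ===== Notes on version B (the rewrite author's own statement) =====
-- stated objective: simpler
-- what changed: Replaced the loop over the SHOW_LEN_2_PTS threshold dict (with break and accumulator) by a flat early-return conditional chain with the point values inlined.
import Mathlib
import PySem

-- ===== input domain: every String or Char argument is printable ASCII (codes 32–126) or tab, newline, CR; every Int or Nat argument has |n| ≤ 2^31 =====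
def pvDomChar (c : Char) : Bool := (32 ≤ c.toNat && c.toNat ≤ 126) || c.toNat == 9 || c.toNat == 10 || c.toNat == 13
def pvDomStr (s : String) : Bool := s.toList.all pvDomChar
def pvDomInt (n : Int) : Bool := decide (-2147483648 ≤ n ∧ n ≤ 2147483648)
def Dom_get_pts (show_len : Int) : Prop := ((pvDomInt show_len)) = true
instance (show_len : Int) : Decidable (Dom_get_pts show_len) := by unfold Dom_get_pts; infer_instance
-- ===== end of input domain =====

-- B replaces A's loop-over-threshold-dict-with-break by a flat conditional chain (simpler).

-- ===== PORT A =====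
-- the module-level dict SHOW_LEN_2_PTS, inner dicts as (font, line) pairs keyed by field name
def SHOW_LEN_2_PTS : PySem.Dict Int (PySem.Dict String Int) :=
  PySem.Dict.mk
    [(0, PySem.Dict.mk [("font", 54), ("line", 72)]),
     (22, PySem.Dict.mk [("font", 45), ("line", 60)]),
     (30, PySem.Dict.mk [("font", 39), ("line", 52)]),
     (38, PySem.Dict.mk [("font", 32), ("line", 36)])]

-- the for-loop with break, as structural recursion over the key list with the accumulator (font_pt, line_pt)
def get_pts_loop (show_len : Int) : List Int → Int × Int → Int × Int
  | [], st => st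
  | key :: rest, st =>
      if key > show_len then st
      else
        let obj := (PySem.Dict.get? SHOW_LEN_2_PTS key).getD PySem.Dict.empty
        get_pts_loop show_len rest ((PySem.Dict.get? obj "font").getD 0, (PySem.Dict.get? obj "line").getD 0)

def get_pts (show_len : Int) : Int × Int :=
  get_pts_loop show_len (PySem.Dict.keys SHOW_LEN_2_PTS) (0, 0)

-- ===== PORT B =====
def get_pts_alt (show_len : Int) : Int × Int :=
  if show_len < 0 then (0, 0)
  else if show_len < 22 then (54, 72)
  else if show_len < 30 then (45, 60)
  else if show_len < 38 then (39, 52)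
  else (32, 36)

-- ===== PRECONDITION & SPEC =====
def Spec_get_pts (show_len : Int) (out : Int × Int) : Prop := out = get_pts_alt show_len
instance (show_len : Int) (out : Int × Int) : Decidable (Spec_get_pts show_len out) := by unfold Spec_get_pts; infer_instance

-- ===== CLAIM (what is proved, stated in full; the proofs are below) =====
def Claim_equal_get_pts : Prop := ∀ (show_len : Int), Dom_get_pts show_len → Spec_get_pts show_len (get_pts show_len)

-- ===== LEMMAS AND PROOFS =====

-- ===== VERDICT (by name: the statement is the Claim_ definition above) =====
theorem get_pts_spec : Claim_equal_get_pts := by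
  intro n _
  show get_pts n = get_pts_alt n
  have hA : get_pts n =
      if (0:Int) > n then (0, 0)
      else if (22:Int) > n then (54, 72)
      else if (30:Int) > n then (45, 60)
      else if (38:Int) > n then (39, 52)
      else (32, 36) := by
    simp only [get_pts, SHOW_LEN_2_PTS, PySem.Dict.keys_mk, List.map, get_pts_loop,
      PySem.Dict.get?_mk_cons]
    norm_num [PySem.Dict.get?_mk_cons, PySem.Dict.get?, PySem.Dict.empty]
    split_ifs <;> simp_all
  rw [hA]
  unfold get_pts_alt
  split_ifs <;> rfl
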